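-- pv_equiv track=rewrite | github.com/vernamlab/InfoNEAT | src/dataset_split.py | batch_data_ovr
-- ===== SOURCE A (Python) =====
-- def batch_data_ovr(x, y, md, m): ### added by Rabin with addition of metadata (md)
--     x_batch = list()
--     y_batch = list()
--     md_batch = list()
--     if type(x) is not list and type(y) is not list:
--         x = x.tolist()
--         y = y.tolist()
--         md = md.tolist()
--     for j in range(0,256):
--         i = 0
--         for a, b, c in zip(x, y, md):
--             if b == j and i < m:
--                 x_batch.append(a)
--                 y_batch.append(b)
--                 md_batch.append(c)
--                 i += 1
--             if len(x_batch) == m * 256: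
--                 break
--     return x_batch, y_batch, md_batch
-- ===== SOURCE B (Python) =====
-- def batch_data_ovr(x, y, md, m):
--     # One pass: bucket (a, c) pairs per label 0..255 (capped at m each), then concat in label order.
--     buckets = [[] for _ in range(256)]
--     for a, b, c in zip(x, y, md):
--         if 0 <= b < 256 and len(buckets[b]) < m:
--             buckets[b].append((a, c))
--     x_batch, y_batch, md_batch = [], [], []
--     for lab, bucket in enumerate(buckets):
--         for a, c in bucket:
--             x_batch.append(a)
--             y_batch.append(lab)
--             md_batch.append(c)
--     return x_batch, y_batch, md_batch
-- ===== Notes on version B (the rewrite author's own statement) =====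
-- stated objective: faster
-- what changed: A scans zip(x,y,md) once per label (256 passes, each with a per-label counter and a global-length break); B makes a single pass that buckets (a,c) pairs into 256 per-label lists capped at m, then concatenates the buckets in label order 0..255.
import Mathlib
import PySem

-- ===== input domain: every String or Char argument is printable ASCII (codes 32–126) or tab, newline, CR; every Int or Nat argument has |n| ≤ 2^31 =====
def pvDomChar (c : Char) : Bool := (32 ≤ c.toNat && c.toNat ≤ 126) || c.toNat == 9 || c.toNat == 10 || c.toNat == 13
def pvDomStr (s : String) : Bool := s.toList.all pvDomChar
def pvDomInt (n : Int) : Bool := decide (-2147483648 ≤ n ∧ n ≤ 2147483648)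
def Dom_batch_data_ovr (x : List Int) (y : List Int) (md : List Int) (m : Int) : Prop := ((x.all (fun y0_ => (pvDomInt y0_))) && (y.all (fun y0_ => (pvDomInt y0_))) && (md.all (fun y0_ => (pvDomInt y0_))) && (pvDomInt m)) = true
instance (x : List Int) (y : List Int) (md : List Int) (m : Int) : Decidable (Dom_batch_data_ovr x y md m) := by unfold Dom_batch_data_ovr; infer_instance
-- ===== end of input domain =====

-- B replaces A's 256 passes over zip(x,y,md) by a single bucketing pass (per-label lists capped
-- at m) followed by concatenation in label order 0..255; same return value, fewer scans.

-- ===== PORT A =====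
-- zip(x, y, md): truncates to the shortest of the three lists
def pvTriples (x y md : List Int) : List (Int × Int × Int) := x.zip (y.zip md)

-- the inner 'for a, b, c in zip(...)' loop of A, with counter i and the len == m*256 break
def pvInnerA (m j : Int) : List (Int × Int × Int) → Int → List Int × List Int × List Int → List Int × List Int × List Int
  | [], _, acc => acc
  | (a, b, c) :: rest, i, acc =>
      let acc' := if b = j ∧ i < m then (acc.1 ++ [a], acc.2.1 ++ [b], acc.2.2 ++ [c]) else acc
      let i' := if b = j ∧ i < m then i + 1 else i
      if (acc'.1.length : Int) = m * 256 then acc' else pvInnerA m j rest i' acc'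

def batch_data_ovr (x : List Int) (y : List Int) (md : List Int) (m : Int) : List Int × List Int × List Int :=
  (PySem.List.pyRange 0 256 1).foldl (fun acc j => pvInnerA m j (pvTriples x y md) 0 acc) ([], [], [])

-- ===== PORT B =====
-- one bucketing step: 'if 0 <= b < 256 and len(buckets[b]) < m: buckets[b].append((a, c))'
def pvBStep (m : Int) (bks : List (List (Int × Int))) (t : Int × Int × Int) : List (List (Int × Int)) :=
  if 0 ≤ t.2.1 ∧ t.2.1 < 256 ∧ ((bks.getD t.2.1.toNat []).length : Int) < m then
    bks.set t.2.1.toNat (bks.getD t.2.1.toNat [] ++ [(t.1, t.2.2)])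
  else bks

-- emit one (lab, bucket) pair of the enumerate loop
def pvEmit (acc : List Int × List Int × List Int) (p : Int × List (Int × Int)) : List Int × List Int × List Int :=
  p.2.foldl (fun a q => (a.1 ++ [q.1], a.2.1 ++ [p.1], a.2.2 ++ [q.2])) acc

def batch_data_ovr_alt (x : List Int) (y : List Int) (md : List Int) (m : Int) : List Int × List Int × List Int :=
  let buckets := (pvTriples x y md).foldl (pvBStep m) (List.replicate 256 [])
  (PySem.List.enumerate buckets 0).foldl pvEmit ([], [], [])

-- ===== PRECONDITION & SPEC =====
def Spec_batch_data_ovr (x : List Int) (y : List Int) (md : List Int) (m : Int) (out : List Int × List Int × List Int) : Prop := out = batch_data_ovr_alt x y md m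
instance (x : List Int) (y : List Int) (md : List Int) (m : Int) (out : List Int × List Int × List Int) : Decidable (Spec_batch_data_ovr x y md m out) := by unfold Spec_batch_data_ovr; infer_instance

-- ===== CLAIM (what is proved, stated in full; the proofs are below) =====
def Claim_equal_batch_data_ovr : Prop := ∀ (x : List Int) (y : List Int) (md : List Int) (m : Int), Dom_batch_data_ovr x y md m → Spec_batch_data_ovr x y md m (batch_data_ovr x y md m)

-- ===== LEMMAS AND PROOFS =====

-- common characterisation: per label j, the first m triples (of the zip) whose middle is j
def pvSel (L : List (Int × Int × Int)) (m j : Int) : List (Int × Int × Int) :=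
  List.take m.toNat (L.filter (fun t => t.2.1 == j))

def pvOut (L : List (Int × Int × Int)) : List Int × List Int × List Int :=
  (L.map (·.1), L.map (·.2.1), L.map (·.2.2))

def pvG (L : List (Int × Int × Int)) (m : Int) (n : Nat) : List (Int × Int × Int) :=
  (PySem.List.pyRange 0 n 1).flatMap (fun j => pvSel L m j)

-- ---- A side ----

theorem pvInnerA_ge (m j : Int) (l : List (Int × Int × Int)) (i : Int) (acc : List Int × List Int × List Int)
    (h : m ≤ i) : pvInnerA m j l i acc = acc := by
  induction l with
  | nil => rfl
  | cons t rest ih =>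
      obtain ⟨a, b, c⟩ := t
      have hb : ¬ (b = j ∧ i < m) := by rintro ⟨_, h2⟩; omega
      simp only [pvInnerA, if_neg hb]
      split
      · rfl
      · exact ih

theorem pvInnerA_eq (m j : Int) (l : List (Int × Int × Int)) :
    ∀ (i : Int) (xb yb mb : List Int), 0 ≤ i → i ≤ m →
      (xb.length : Int) + (m - i) ≤ m * 256 →
      pvInnerA m j l i (xb, yb, mb) =
        (xb ++ (List.take (m - i).toNat (l.filter (fun t => t.2.1 == j))).map (·.1),
         yb ++ (List.take (m - i).toNat (l.filter (fun t => t.2.1 == j))).map (·.2.1),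
         mb ++ (List.take (m - i).toNat (l.filter (fun t => t.2.1 == j))).map (·.2.2)) := by
  induction l with
  | nil => intro i xb yb mb _ _ _; simp [pvInnerA]
  | cons t rest ih =>
      obtain ⟨a, b, c⟩ := t
      intro i xb yb mb h0 him hlen
      by_cases hi : i = m
      · subst hi
        rw [pvInnerA_ge i j _ i (xb, yb, mb) le_rfl]
        simp
      · have hilt : i < m := lt_of_le_of_ne him hi
        by_cases hbj : b = j
        · have hcond : b = j ∧ i < m := ⟨hbj, hilt⟩
          have hfilt : ((a, b, c) :: rest).filter (fun t => t.2.1 == j) =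
              (a, b, c) :: rest.filter (fun t => t.2.1 == j) := by
            simp [hbj]
          have htonat : (m - i).toNat = ((m - (i+1)).toNat) + 1 := by omega
          by_cases hbrk : ((xb.length : Int) + 1) = m * 256
          · -- break fires right after this append; then i+1 = m so nothing more would be taken
            have him1 : m - i = 1 := by omega
            simp only [pvInnerA, if_pos hcond]
            rw [hfilt, him1]
            have : ((xb ++ [a]).length : Int) = m * 256 := by simp; omega
            rw [if_pos this]
            simp [hbj]
          · simp only [pvInnerA, if_pos hcond]
            have hne : ¬ (((xb ++ [a]).length : Int) = m * 256) := by simp; omega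
            rw [if_neg hne]
            rw [ih (i+1) (xb ++ [a]) (yb ++ [b]) (mb ++ [c]) (by omega) (by omega) (by simp; omega)]
            rw [hfilt, htonat]
            simp [hbj]
        · have hcond : ¬ (b = j ∧ i < m) := by rintro ⟨h1, _⟩; exact hbj h1
          have hfilt : ((a, b, c) :: rest).filter (fun t => t.2.1 == j) =
              rest.filter (fun t => t.2.1 == j) := by
            simp [hbj]
          simp only [pvInnerA, if_neg hcond]
          have hne : ¬ ((xb.length : Int) = m * 256) := by omega
          rw [if_neg hne, ih i xb yb mb h0 him hlen, hfilt]

theorem pvA_outer (L : List (Int × Int × Int)) (m : Int) (hm : 0 ≤ m) :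
    ∀ (n : Nat), n ≤ 256 →
      (PySem.List.pyRange 0 n 1).foldl (fun acc j => pvInnerA m j L 0 acc) ([], [], []) = pvOut (pvG L m n)
      ∧ ((pvG L m n).length : Int) ≤ (n : Int) * m := by
  intro n
  induction n with
  | zero => intro _; simp [pvG, pvOut]
  | succ n ih =>
      intro hn
      obtain ⟨ihE, ihL⟩ := ih (by omega)
      have hsplit : PySem.List.pyRange 0 ((n : Int) + 1) 1 =
          PySem.List.pyRange 0 (n : Int) 1 ++ [(n : Int)] :=
        PySem.List.pyRange_one_succ_right (by omega)
      have hcast : ((n : Int) + 1) = ((n + 1 : Nat) : Int) := by push_cast; ring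
      constructor
      · show (PySem.List.pyRange 0 ((n+1 : Nat) : Int) 1).foldl _ _ = _
        rw [← hcast, hsplit, List.foldl_append]
        simp only [List.foldl_cons, List.foldl_nil]
        rw [ihE]
        have hinner := pvInnerA_eq m (n : Int) L 0
          ((pvG L m n).map (·.1)) ((pvG L m n).map (·.2.1)) ((pvG L m n).map (·.2.2))
          le_rfl hm (by
            simp only [List.length_map, sub_zero]
            have h1 : ((n : Int)) * m + m ≤ m * 256 := by nlinarith
            omega)
        rw [pvOut, hinner]
        have hG : pvG L m (n+1) = pvG L m n ++ pvSel L m (n : Int) := by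
          unfold pvG
          rw [← hcast, hsplit, List.flatMap_append]
          simp
        have hm0 : (m - 0).toNat = m.toNat := by omega
        rw [pvOut, hG]
        simp [pvSel]
      · have hG : pvG L m (n+1) = pvG L m n ++ pvSel L m (n : Int) := by
          unfold pvG
          rw [← hcast, hsplit, List.flatMap_append]
          simp
        rw [hG]
        have hsel : ((pvSel L m (n : Int)).length : Int) ≤ m := by
          have := List.length_take_le m.toNat (L.filter (fun t => t.2.1 == (n : Int)))
          have h2 : (m.toNat : Int) = m := by omega
          unfold pvSel
          omega
        simp only [List.length_append]
        push_cast
        nlinarith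

theorem pvA_neg (L : List (Int × Int × Int)) (m : Int) (hm : m < 0) (ls : List Int) :
    ∀ acc, ls.foldl (fun acc j => pvInnerA m j L 0 acc) acc = acc := by
  induction ls with
  | nil => intro acc; rfl
  | cons j rest ih =>
      intro acc
      rw [List.foldl_cons, pvInnerA_ge m j L 0 acc (by omega)]
      exact ih acc

-- ---- B side ----

theorem pvBStep_length (m : Int) (bks : List (List (Int × Int))) (t : Int × Int × Int) :
    (pvBStep m bks t).length = bks.length := by
  unfold pvBStep; split <;> simp

def pvScalar (m j : Int) (bk : List (Int × Int)) (t : Int × Int × Int) : List (Int × Int) :=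
  if t.2.1 = j ∧ (bk.length : Int) < m then bk ++ [(t.1, t.2.2)] else bk

theorem pvBuckets_get (m : Int) (L : List (Int × Int × Int)) :
    ∀ (bks : List (List (Int × Int))), bks.length = 256 → ∀ (jn : Nat), jn < 256 →
      (L.foldl (pvBStep m) bks).getD jn [] = L.foldl (pvScalar m (jn : Int)) (bks.getD jn []) := by
  induction L with
  | nil => intro bks _ jn _; rfl
  | cons t rest ih =>
      intro bks hlen jn hjn
      obtain ⟨a, b, c⟩ := t
      simp only [List.foldl_cons]
      by_cases hbj : b = (jn : Int)
      · have hbt : b.toNat = jn := by omega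
        have hb0 : 0 ≤ b := by omega
        have hb256 : b < 256 := by omega
        by_cases hfull : ((bks.getD jn []).length : Int) < m
        · have hg : 0 ≤ b ∧ b < 256 ∧ ((bks.getD b.toNat []).length : Int) < m := by
            refine ⟨hb0, hb256, ?_⟩; rw [hbt]; exact hfull
          have hstep : pvBStep m bks (a, b, c) =
              bks.set jn (bks.getD jn [] ++ [(a, c)]) := by
            unfold pvBStep; rw [if_pos hg]; rw [hbt]
          rw [hstep, ih _ (by simp [hlen]) jn hjn]
          have hget : (bks.set jn (bks.getD jn [] ++ [(a, c)])).getD jn [] =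
              bks.getD jn [] ++ [(a, c)] := by
            have hlt : jn < bks.length := by omega
            simp [List.getD, List.getElem?_set_self', List.getElem?_eq_getElem hlt]
          rw [hget]
          have hsc : pvScalar m (jn : Int) (bks.getD jn []) (a, b, c) =
              bks.getD jn [] ++ [(a, c)] := by
            unfold pvScalar; rw [if_pos ⟨hbj, hfull⟩]
          rw [hsc]
        · have hg : ¬ (0 ≤ b ∧ b < 256 ∧ ((bks.getD b.toNat []).length : Int) < m) := by
            rintro ⟨_, _, h3⟩; rw [hbt] at h3; exact hfull h3
          have hstep : pvBStep m bks (a, b, c) = bks := by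
            unfold pvBStep; rw [if_neg hg]
          have hsc : pvScalar m (jn : Int) (bks.getD jn []) (a, b, c) = bks.getD jn [] := by
            unfold pvScalar; rw [if_neg (by rintro ⟨_, h2⟩; exact hfull h2)]
          rw [hstep, hsc, ih _ hlen jn hjn]
      · have hsc : pvScalar m (jn : Int) (bks.getD jn []) (a, b, c) = bks.getD jn [] := by
          unfold pvScalar; rw [if_neg (by rintro ⟨h1, _⟩; exact hbj h1)]
        rw [hsc]
        by_cases hg : 0 ≤ b ∧ b < 256 ∧ ((bks.getD b.toNat []).length : Int) < m
        · have hbt : b.toNat ≠ jn := by omega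
          have hstep : pvBStep m bks (a, b, c) =
              bks.set b.toNat (bks.getD b.toNat [] ++ [(a, c)]) := by
            unfold pvBStep; rw [if_pos hg]
          rw [hstep, ih _ (by simp [hlen]) jn hjn]
          have hget : (bks.set b.toNat (bks.getD b.toNat [] ++ [(a, c)])).getD jn [] =
              bks.getD jn [] := by
            simp [List.getD]
            rw [List.getElem?_set_ne hbt]
          rw [hget]
        · have hstep : pvBStep m bks (a, b, c) = bks := by
            unfold pvBStep; rw [if_neg hg]
          rw [hstep, ih _ hlen jn hjn]

theorem pvScalar_eq (m j : Int) (L : List (Int × Int × Int)) :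
    ∀ (bk : List (Int × Int)),
      L.foldl (pvScalar m j) bk =
        bk ++ (List.take (m - bk.length).toNat (L.filter (fun t => t.2.1 == j))).map (fun t => (t.1, t.2.2)) := by
  induction L with
  | nil => intro bk; simp
  | cons t rest ih =>
      intro bk
      obtain ⟨a, b, c⟩ := t
      simp only [List.foldl_cons]
      by_cases hbj : b = j
      · by_cases hlt : (bk.length : Int) < m
        · have hsc : pvScalar m j bk (a, b, c) = bk ++ [(a, c)] := by
            unfold pvScalar; rw [if_pos ⟨hbj, hlt⟩]
          rw [hsc, ih]
          have ht : (m - bk.length).toNat = (m - (bk.length + 1)).toNat + 1 := by omega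
          simp [hbj, ht]
        · have hsc : pvScalar m j bk (a, b, c) = bk := by
            unfold pvScalar; rw [if_neg (by rintro ⟨_, h2⟩; exact hlt h2)]
          rw [hsc, ih]
          have ht : (m - bk.length).toNat = 0 := by omega
          simp [ht]
      · have hsc : pvScalar m j bk (a, b, c) = bk := by
          unfold pvScalar; rw [if_neg (by rintro ⟨h1, _⟩; exact hbj h1)]
        rw [hsc, ih]
        simp [hbj]

theorem pvEmit_fold (ps : List (Int × List (Int × Int))) :
    ∀ (acc : List Int × List Int × List Int),
      ps.foldl pvEmit acc =
        (acc.1 ++ ps.flatMap (fun p => p.2.map (·.1)),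
         acc.2.1 ++ ps.flatMap (fun p => p.2.map (fun _ => p.1)),
         acc.2.2 ++ ps.flatMap (fun p => p.2.map (·.2))) := by
  induction ps with
  | nil => intro acc; simp
  | cons p rest ih =>
      intro acc
      simp only [List.foldl_cons, List.flatMap_cons]
      rw [ih]
      have hone : ∀ (bk : List (Int × Int)) (lab : Int) (acc : List Int × List Int × List Int),
          pvEmit acc (lab, bk) =
            (acc.1 ++ bk.map (·.1), acc.2.1 ++ bk.map (fun _ => lab), acc.2.2 ++ bk.map (·.2)) := by
        intro bk
        induction bk with
        | nil => intro lab acc; simp [pvEmit]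
        | cons q bkr ihb =>
            intro lab acc
            show (bkr.foldl _ _) = _
            have := ihb lab (acc.1 ++ [q.1], acc.2.1 ++ [lab], acc.2.2 ++ [q.2])
            simp only [pvEmit] at this
            rw [this]
            simp
      obtain ⟨lab, bk⟩ := p
      rw [hone bk lab acc]
      simp

theorem pvB_eq (x y md : List Int) (m : Int) :
    batch_data_ovr_alt x y md m = pvOut (pvG (pvTriples x y md) m 256) := by
  have hfoldlen : ∀ (L : List (Int × Int × Int)) (bks : List (List (Int × Int))),
      (L.foldl (pvBStep m) bks).length = bks.length := by
    intro L
    induction L with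
    | nil => intro bks; rfl
    | cons t rest ih => intro bks; rw [List.foldl_cons, ih, pvBStep_length]
  show (PySem.List.enumerate ((pvTriples x y md).foldl (pvBStep m) (List.replicate 256 [])) 0).foldl pvEmit ([], [], []) = _
  set L := pvTriples x y md with hL
  set buckets := L.foldl (pvBStep m) (List.replicate 256 []) with hbk
  have hlen : buckets.length = 256 := by rw [hbk, hfoldlen]; exact List.length_replicate
  have hget : ∀ jn : Nat, jn < 256 →
      buckets.getD jn [] = (pvSel L m jn).map (fun t => (t.1, t.2.2)) := by
    intro jn hjn
    rw [hbk, pvBuckets_get m L _ List.length_replicate jn hjn, pvScalar_eq]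
    have hrep : (List.replicate 256 ([] : List (Int × Int))).getD jn [] = [] := by
      rw [List.getD_replicate]; exact hjn
    rw [hrep]
    simp only [List.length_nil, Nat.cast_zero, sub_zero, List.nil_append, pvSel]
  have henum : PySem.List.enumerate buckets 0 =
      (PySem.List.pyRange 0 (PySem.List.len buckets) 1).map
        (fun j => (j, PySem.List.pyGetD buckets j ([] : List (Int × Int)))) :=
    PySem.List.enumerate_eq_map_pyRange buckets []
  have hlen' : PySem.List.len buckets = 256 := by
    simp [PySem.List.len, hlen]
  have henum2 : PySem.List.enumerate buckets 0 =
      (PySem.List.pyRange 0 256 1).map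
        (fun j => (j, (pvSel L m j).map (fun t => (t.1, t.2.2)))) := by
    rw [henum, hlen']
    apply List.map_congr_left
    intro j hj
    rw [PySem.List.mem_pyRange_one] at hj
    rw [PySem.List.pyGetD_of_nonneg buckets [] hj.1]
    have hjn : j.toNat < 256 := by omega
    rw [hget j.toNat hjn]
    have hcastj : ((j.toNat : Int)) = j := by omega
    rw [hcastj]
  rw [henum2, pvEmit_fold]
  have hsel21 : ∀ j : Int, (pvSel L m j).map (fun t => t.2.1) = (pvSel L m j).map (fun _ => j) := by
    intro j
    apply List.map_congr_left
    intro t ht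
    have h1 : t ∈ L.filter (fun t => t.2.1 == j) := List.mem_of_mem_take ht
    have h2 := (List.mem_filter.mp h1).2
    simpa using h2
  simp [pvOut, pvG, List.map_flatMap, List.flatMap_map, List.map_map, Function.comp_def, hsel21]

-- ===== VERDICT (by name: the statement is the Claim_ definition above) =====
theorem batch_data_ovr_spec : Claim_equal_batch_data_ovr := by
  intro x y md m _
  show batch_data_ovr x y md m = batch_data_ovr_alt x y md m
  rw [pvB_eq]
  by_cases hm : 0 ≤ m
  · exact (pvA_outer (pvTriples x y md) m hm 256 le_rfl).1
  · have hm' : m < 0 := by omega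
    rw [batch_data_ovr, pvA_neg _ m hm']
    have hsel : ∀ j : Int, pvSel (pvTriples x y md) m j = [] := by
      intro j; unfold pvSel
      have : m.toNat = 0 := by omega
      simp [this]
    simp [pvG, pvOut, hsel]
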